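-- pv_equiv track=rewrite | github.com/mhmudak/mt5-algorithmic-trading-bot | src/strategies/strategy_wavetrend_pivot.py | _next_above_level
-- ===== SOURCE A (Python) =====
-- def _next_above_level(current_name, current_level, ordered_levels):
--     found_current = False
--
--     for name, level in ordered_levels:
--         if found_current:
--             return name, level
--
--         if name == current_name and level == current_level:
--             found_current = True
--
--     return None
-- ===== SOURCE B (Python) =====
-- def _next_above_level(current_name, current_level, ordered_levels):
--     pairs = [(name, level) for name, level in ordered_levels]
--     try:
--         i = pairs.index((current_name, current_level))
--     except ValueError:
--         return None
--     if i + 1 < len(pairs):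
--         return pairs[i + 1]
--     return None
-- ===== Notes on version B (the rewrite author's own statement) =====
-- stated objective: simpler
-- what changed: Replaced the flag-and-continue single loop with a two-phase locate-then-neighbor decomposition: find the index of the matching pair with list.index, then return the element at index+1 if it exists.
import Mathlib
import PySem

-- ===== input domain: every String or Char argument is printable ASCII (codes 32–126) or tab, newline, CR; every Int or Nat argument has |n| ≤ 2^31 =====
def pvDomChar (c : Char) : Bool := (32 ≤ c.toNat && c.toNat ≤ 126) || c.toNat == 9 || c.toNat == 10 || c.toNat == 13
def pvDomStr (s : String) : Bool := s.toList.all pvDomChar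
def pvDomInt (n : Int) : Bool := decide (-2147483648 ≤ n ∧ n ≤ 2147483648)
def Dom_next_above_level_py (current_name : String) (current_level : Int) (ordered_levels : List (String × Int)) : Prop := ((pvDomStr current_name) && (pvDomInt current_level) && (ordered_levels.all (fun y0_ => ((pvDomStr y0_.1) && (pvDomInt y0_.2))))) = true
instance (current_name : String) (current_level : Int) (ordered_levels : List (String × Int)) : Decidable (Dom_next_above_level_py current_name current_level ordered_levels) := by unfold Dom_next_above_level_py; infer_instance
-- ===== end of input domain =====

-- B replaces A's flag-and-continue single loop by a locate-then-neighbor two-phase decomposition (objective: simpler).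
-- ===== PORT A =====
-- A: single loop with a found_current flag
def nalGoA (current_name : String) (current_level : Int) : Bool → List (String × Int) → Option (String × Int)
  | _, [] => none
  | found, (name, level) :: rest =>
    if found then some (name, level)
    else if name = current_name ∧ level = current_level then nalGoA current_name current_level true rest
    else nalGoA current_name current_level false rest

def next_above_level_py (current_name : String) (current_level : Int) (ordered_levels : List (String × Int)) : Option (String × Int) :=
  nalGoA current_name current_level false ordered_levels

-- ===== PORT B =====
-- B: locate the first matching pair by index, then return its neighbor
def next_above_level_py_alt (current_name : String) (current_level : Int) (ordered_levels : List (String × Int)) : Option (String × Int) :=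
  match PySem.List.index? ordered_levels (current_name, current_level) with
  | none => none
  | some i => if i + 1 < ordered_levels.length then PySem.List.pyGet? ordered_levels ((i : Int) + 1) else none

-- ===== PRECONDITION & SPEC =====
def Spec_next_above_level_py (current_name : String) (current_level : Int) (ordered_levels : List (String × Int)) (out : Option (String × Int)) : Prop := out = next_above_level_py_alt current_name current_level ordered_levels
instance (current_name : String) (current_level : Int) (ordered_levels : List (String × Int)) (out : Option (String × Int)) : Decidable (Spec_next_above_level_py current_name current_level ordered_levels out) := by unfold Spec_next_above_level_py; infer_instance

-- ===== CLAIM (what is proved, stated in full; the proofs are below) =====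
def Claim_equal_next_above_level_py : Prop := ∀ (current_name : String) (current_level : Int) (ordered_levels : List (String × Int)), Dom_next_above_level_py current_name current_level ordered_levels → Spec_next_above_level_py current_name current_level ordered_levels (next_above_level_py current_name current_level ordered_levels)

-- ===== LEMMAS AND PROOFS =====

-- ===== VERDICT (by name: the statement is the Claim_ definition above) =====
lemma nal_main (cn : String) (cl : Int) (ls : List (String × Int)) :
    nalGoA cn cl false ls = next_above_level_py_alt cn cl ls := by
  induction ls with
  | nil => simp [nalGoA, next_above_level_py_alt, PySem.List.index?]
  | cons p rest ih =>
    obtain ⟨n, l⟩ := p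
    by_cases h : n = cn ∧ l = cl
    · obtain ⟨rfl, rfl⟩ := h
      rw [show nalGoA n l false ((n, l) :: rest) = nalGoA n l true rest from by simp [nalGoA]]
      unfold next_above_level_py_alt
      rw [PySem.List.index?_cons_self]
      cases rest with
      | nil => simp [nalGoA]
      | cons q t => simp [nalGoA, PySem.List.pyGet?, PySem.List.pyIdx?]
    · have hne : (n, l) ≠ (cn, cl) := by
        intro he; exact h (by injection he with h1 h2; exact ⟨h1, h2⟩)
      rw [show nalGoA cn cl false ((n, l) :: rest) = nalGoA cn cl false rest from by
        simp [nalGoA, h]]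
      rw [ih]
      unfold next_above_level_py_alt
      rw [PySem.List.index?_cons_of_ne _ hne]
      cases hi : PySem.List.index? rest (cn, cl) with
      | none => simp
      | some i =>
        simp only [Option.map_some]
        rw [show ((i : Nat) : Int) + 1 = ((i + 1 : Nat) : Int) from by push_cast; ring,
            show ((i + 1 : Nat) : Int) + 1 = ((i + 2 : Nat) : Int) from by push_cast; ring,
            PySem.List.pyGet?_natCast, PySem.List.pyGet?_natCast]
        simp only [List.length_cons]
        by_cases hc : i + 1 < rest.length
        · rw [if_pos hc, if_pos (show i + 1 + 1 < rest.length + 1 by omega)]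
          simp
        · rw [if_neg hc, if_neg (show ¬ i + 1 + 1 < rest.length + 1 by omega)]

theorem next_above_level_py_spec : Claim_equal_next_above_level_py := by
  intro cn cl ls _
  unfold Spec_next_above_level_py next_above_level_py
  exact nal_main cn cl ls
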